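-- pv_equiv track=rewrite | github.com/869277160/MyLeetCode | 306.累加数.py | check_rest
-- ===== SOURCE A (Python) =====
-- def check_rest(num, now_num, output):
--
--     current_idx = 0
--     last_num_1 = now_num
--     last_num_2 = output
--     new_output = last_num_1 + last_num_2
--     while current_idx < len(num):
--         new_output = last_num_1 + last_num_2
--         if str(new_output) != num[current_idx : current_idx + len(str(new_output))]:
--             return False
--         current_idx = current_idx + len(str(new_output))
--         last_num_1 = last_num_2
--         last_num_2 = new_output
--     return True
-- ===== SOURCE B (Python) =====
-- def check_rest(num, now_num, output):
--     buf = ""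
--     last1, last2 = now_num, output
--     while len(buf) < len(num):
--         t = last1 + last2
--         buf += str(t)
--         last1, last2 = last2, t
--     return buf == num
-- ===== Notes on version B (the rewrite author's own statement) =====
-- stated objective: simpler
-- what changed: Instead of walking an index through num and comparing each new term against a slice with an early return, B generates the expected digit string into a buffer until it is at least as long as num and does a single final string equality check, eliminating all slicing and per-term comparisons.
import Mathlib
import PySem

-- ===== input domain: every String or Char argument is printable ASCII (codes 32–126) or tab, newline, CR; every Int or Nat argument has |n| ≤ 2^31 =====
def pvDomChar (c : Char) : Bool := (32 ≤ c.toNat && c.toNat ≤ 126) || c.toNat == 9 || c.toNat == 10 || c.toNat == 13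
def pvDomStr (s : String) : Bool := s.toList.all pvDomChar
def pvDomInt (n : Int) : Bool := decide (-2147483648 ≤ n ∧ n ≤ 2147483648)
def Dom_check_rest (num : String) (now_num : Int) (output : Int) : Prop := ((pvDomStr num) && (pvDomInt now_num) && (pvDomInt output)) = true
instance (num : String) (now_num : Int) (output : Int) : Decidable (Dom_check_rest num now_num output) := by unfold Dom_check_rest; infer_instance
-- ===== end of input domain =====

-- B generates the expected digit string into a buffer and does one final equality check,
-- instead of A's per-term slice comparison with early return; same complexity (objective: simpler).

-- str(n) is never empty — used by both loops for termination.
theorem pvToChars_len_pos (n : Int) : 0 < (PySem.Int.toChars n).length := by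
  unfold PySem.Int.toChars
  split
  · simp
  · exact Nat.length_toDigits_pos

-- ===== PORT A =====
-- while current_idx < len(num): compare str(new_output) with the slice, advance or return False
def checkA_loop (numL : List Char) (idx : Nat) (l1 l2 : Int) : Bool :=
  if idx < numL.length then
    let t := l1 + l2
    let s := PySem.Int.toChars t
    if s ≠ PySem.List.slice numL (some (idx : Int)) (some ((idx : Int) + (s.length : Int))) then
      false
    else
      checkA_loop numL (idx + s.length) l2 t
  else
    true
termination_by numL.length - idx
decreasing_by
  have := pvToChars_len_pos (l1 + l2)
  omega

def check_rest (num : String) (now_num : Int) (output : Int) : Bool :=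
  checkA_loop num.toList 0 now_num output

-- ===== PORT B =====
-- while len(buf) < len(num): buf += str(last1 + last2); finally buf == num
def checkB_loop (numL : List Char) (buf : List Char) (l1 l2 : Int) : List Char :=
  if buf.length < numL.length then
    checkB_loop numL (buf ++ PySem.Int.toChars (l1 + l2)) l2 (l1 + l2)
  else
    buf
termination_by numL.length - buf.length
decreasing_by
  have := pvToChars_len_pos (l1 + l2)
  simp only [List.length_append]
  omega

def check_rest_alt (num : String) (now_num : Int) (output : Int) : Bool :=
  decide (checkB_loop num.toList [] now_num output = num.toList)

-- ===== PRECONDITION & SPEC =====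
def Spec_check_rest (num : String) (now_num : Int) (output : Int) (out : Bool) : Prop := out = check_rest_alt num now_num output
instance (num : String) (now_num : Int) (output : Int) (out : Bool) : Decidable (Spec_check_rest num now_num output out) := by unfold Spec_check_rest; infer_instance

-- ===== CLAIM (what is proved, stated in full; the proofs are below) =====
def Claim_equal_check_rest : Prop := ∀ (num : String) (now_num : Int) (output : Int), Dom_check_rest num now_num output → Spec_check_rest num now_num output (check_rest num now_num output)

-- ===== LEMMAS AND PROOFS =====

-- B's loop only appends to the buffer.
theorem checkB_loop_prefix (numL buf : List Char) (l1 l2 : Int) :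
    ∃ t, checkB_loop numL buf l1 l2 = buf ++ t := by
  induction buf, l1, l2 using checkB_loop.induct (numL := numL) with
  | case1 buf l1 l2 h ih =>
    obtain ⟨t, ht⟩ := ih
    rw [checkB_loop, if_pos h, ht]
    exact ⟨PySem.Int.toChars (l1 + l2) ++ t, by simp⟩
  | case2 buf l1 l2 h =>
    rw [checkB_loop, if_neg h]
    exact ⟨[], by simp⟩

-- Main invariant: when the buffer is the already-matched prefix of numL,
-- A's loop answers exactly whether B's generated string equals numL.
theorem loop_eq (numL : List Char) :
    ∀ (k : Nat) (buf : List Char) (l1 l2 : Int),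
      numL.length - buf.length ≤ k →
      buf = numL.take buf.length →
      checkA_loop numL buf.length l1 l2 = decide (checkB_loop numL buf l1 l2 = numL) := by
  intro k
  induction k with
  | zero =>
    intro buf l1 l2 hk hpre
    have hge : numL.length ≤ buf.length := by omega
    rw [checkA_loop, if_neg (by omega), checkB_loop, if_neg (by omega)]
    have : buf = numL := by
      rw [hpre, List.take_of_length_le hge]
    simp [this]
  | succ k ih =>
    intro buf l1 l2 hk hpre
    by_cases h : buf.length < numL.length
    · rw [checkA_loop, if_pos h, checkB_loop, if_pos h]
      simp only []
      set s := PySem.Int.toChars (l1 + l2) with hs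
      have hslice : PySem.List.slice numL (some ((buf.length : Nat) : Int))
          (some (((buf.length : Nat) : Int) + ((s.length : Nat) : Int))) =
          (numL.drop buf.length).take s.length :=
        PySem.List.slice_natCast_add numL buf.length s.length
      by_cases hm : s = (numL.drop buf.length).take s.length
      · -- matched chunk: recurse on both sides
        rw [hslice, if_neg (by simpa using hm)]
        have hlen : s.length ≤ numL.length - buf.length := by
          have := congrArg List.length hm
          simp at this
          omega
        have hbuf' : buf ++ s = numL.take (buf ++ s).length := by
          simp only [List.length_append]
          rw [List.take_add, ← hpre, ← hm]
        have := ih (buf ++ s) l2 (l1 + l2)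
          (by
            have hsl : 0 < s.length := by rw [hs]; exact pvToChars_len_pos _
            simp only [List.length_append]; omega) hbuf'
        simpa [List.length_append] using this
      · -- mismatched chunk: A returns False; B's final buffer cannot equal numL
        rw [hslice, if_pos (by simpa using hm)]
        obtain ⟨t, ht⟩ := checkB_loop_prefix numL (buf ++ s) l2 (l1 + l2)
        have hne : buf ++ s ++ t ≠ numL := by
          intro heq
          apply hm
          have hdrop : numL.drop buf.length = s ++ t := by
            have : (buf ++ (s ++ t)).drop buf.length = s ++ t := by
              simp
            rw [← this]
            congr 1
            rw [← heq]
            simp [List.append_assoc]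
          rw [hdrop, List.take_left' rfl]
        rw [ht]
        have hne' : ¬ buf ++ (s ++ t) = numL := by rw [← List.append_assoc]; exact hne
        simp [hne']
    · rw [checkA_loop, if_neg h, checkB_loop, if_neg h]
      have : buf = numL := by
        rw [hpre, List.take_of_length_le (by omega)]
      simp [this]

-- ===== VERDICT (by name: the statement is the Claim_ definition above) =====
theorem check_rest_spec : Claim_equal_check_rest := by
  intro num now_num output _
  unfold Spec_check_rest check_rest check_rest_alt
  have := loop_eq num.toList num.toList.length [] now_num output (by simp) (by simp)
  simpa using this
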